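-- pv_equiv track=rewrite | github.com/imihanovic/PythonExercises | GrafAlgoritmi/Vjezba4/mihanovic_ivana_04_00.py | matricaIncidencijeNeusmjerena
-- ===== SOURCE A (Python) =====
-- def matricaIncidencijeNeusmjerena(edges, nrVertices):
--     matrica_incidencije = []
--     for i in range (int(nrVertices)):
--         row = []
--         for j in range (len(edges)):
--             edge1 = edges[j]
--             if((int(edge1[0])==(i+1)) or (int(edge1[1])==(i+1))):
--                 if(len(edge1) == 3):
--                    row.append(int(edge1[2]))
--                 else:
--                    row.append(1)
--             else:
--                 row.append(0)
--         matrica_incidencije.append(row)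
--
--     return matrica_incidencije
-- ===== SOURCE B (Python) =====
-- def matricaIncidencijeNeusmjerena(edges, nrVertices):
--     V = int(nrVertices)
--     E = len(edges)
--     matrix = [[0] * E for _ in range(V)]
--     for j, edge in enumerate(edges):
--         value = int(edge[2]) if len(edge) == 3 else 1
--         for v in (int(edge[0]), int(edge[1])):
--             if 1 <= v <= V:
--                 matrix[v - 1][j] = value
--     return matrix
-- ===== Notes on version B (the rewrite author's own statement) =====
-- stated objective: faster
-- what changed: Replaces the V*E per-cell membership scan (for each vertex row, rescan every edge) with a pre-zeroed V*E table and one pass over the edges that scatters each edge's value into the rows of its two endpoints.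
-- outside the precondition, e.g. on matricaIncidencijeNeusmjerena([[1]], 1): A returns [[1]], B raises IndexError; on matricaIncidencijeNeusmjerena([[2]], 0): A returns [], B raises IndexError
import Mathlib
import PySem

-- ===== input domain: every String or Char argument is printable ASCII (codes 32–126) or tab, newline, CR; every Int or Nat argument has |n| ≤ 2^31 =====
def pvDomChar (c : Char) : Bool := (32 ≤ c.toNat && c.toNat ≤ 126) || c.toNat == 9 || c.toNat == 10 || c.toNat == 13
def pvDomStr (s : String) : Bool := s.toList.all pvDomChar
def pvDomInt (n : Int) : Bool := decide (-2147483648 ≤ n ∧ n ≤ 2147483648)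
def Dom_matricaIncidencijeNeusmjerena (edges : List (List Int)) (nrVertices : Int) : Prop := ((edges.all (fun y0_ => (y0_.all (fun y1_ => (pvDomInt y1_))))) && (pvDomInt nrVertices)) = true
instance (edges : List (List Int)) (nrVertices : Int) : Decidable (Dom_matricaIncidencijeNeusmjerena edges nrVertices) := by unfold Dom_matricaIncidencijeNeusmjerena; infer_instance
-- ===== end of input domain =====

-- B replaces A's per-cell membership scan with a pre-zeroed table and a single
-- edge-driven scatter pass (objective: faster by a constant factor on the scan work).

-- ===== PORT A =====
-- literal transliteration of A: outer loop over rows i, inner loop over edge indices j,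
-- appending one cell per edge.  edges.getD j [] is exact for j < edges.length (always
-- the case here); e.getD k 0 is Python's e[k], exact whenever Python does not raise
-- (Pre_ excludes edges shorter than 2; e[2] is only read when the length is exactly 3).
def matricaIncidencijeNeusmjerena (edges : List (List Int)) (nrVertices : Int) : List (List Int) :=
  (List.range nrVertices.toNat).foldl (fun acc (i : Nat) =>
    acc ++ [(List.range edges.length).foldl (fun row (j : Nat) =>
      let e := edges.getD j []
      if e.getD 0 0 = (i : Int) + 1 ∨ e.getD 1 0 = (i : Int) + 1 then
        if e.length = 3 then row ++ [e.getD 2 0] else row ++ [1]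
      else row ++ [0]) []]) []

-- ===== PORT B =====
-- transliteration of Source B: 'matrix[v-1][j] = value' guarded by 1 ≤ v ≤ V
def pvCell (V : Int) (j : Nat) (v value : Int) (m : List (List Int)) : List (List Int) :=
  if 1 ≤ v ∧ v ≤ V then m.set (v - 1).toNat ((m.getD (v - 1).toNat []).set j value) else m

-- the 'for j, edge in enumerate(edges)' loop of Source B, j carried explicitly
def pvScatter (V : Int) : Nat → List (List Int) → List (List Int) → List (List Int)
  | _, [], m => m
  | j, e :: rest, m =>
    let value := if e.length = 3 then e.getD 2 0 else 1
    pvScatter V (j + 1) rest (pvCell V j (e.getD 1 0) value (pvCell V j (e.getD 0 0) value m))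

def matricaIncidencijeNeusmjerena_alt (edges : List (List Int)) (nrVertices : Int) : List (List Int) :=
  pvScatter nrVertices 0 edges
    (List.replicate nrVertices.toNat (List.replicate edges.length 0))

-- ===== PRECONDITION & SPEC =====
-- Pre_ excludes edges with fewer than two entries: there Python's edge[1] (or edge[0])
-- indexing raises IndexError in B always and in A whenever a row check reaches it; the
-- rare inputs where A still returns (short-circuit on edge[0], or nrVertices ≤ 0 so the
-- edges are never inspected) are accidents of A's cell-by-cell scan order (see cites).
def Pre_matricaIncidencijeNeusmjerena (edges : List (List Int)) (nrVertices : Int) : Prop :=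
  ∀ e ∈ edges, 2 ≤ e.length
instance (edges : List (List Int)) (nrVertices : Int) : Decidable (Pre_matricaIncidencijeNeusmjerena edges nrVertices) := by unfold Pre_matricaIncidencijeNeusmjerena; infer_instance
def pvWitness_matricaIncidencijeNeusmjerena : List (List Int) × Int := ([[1, 2], [2, 3, 5]], 3)

def Spec_matricaIncidencijeNeusmjerena (edges : List (List Int)) (nrVertices : Int) (out : List (List Int)) : Prop := out = matricaIncidencijeNeusmjerena_alt edges nrVertices
instance (edges : List (List Int)) (nrVertices : Int) (out : List (List Int)) : Decidable (Spec_matricaIncidencijeNeusmjerena edges nrVertices out) := by unfold Spec_matricaIncidencijeNeusmjerena; infer_instance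

-- ===== CLAIM (what is proved, stated in full; the proofs are below) =====
def Claim_equal_matricaIncidencijeNeusmjerena : Prop := ∀ (edges : List (List Int)) (nrVertices : Int), Dom_matricaIncidencijeNeusmjerena edges nrVertices → Pre_matricaIncidencijeNeusmjerena edges nrVertices → Spec_matricaIncidencijeNeusmjerena edges nrVertices (matricaIncidencijeNeusmjerena edges nrVertices)

-- ===== LEMMAS AND PROOFS =====

-- the value A puts in cell (row i, column j)
def pvCellVal (edges : List (List Int)) (i j : Nat) : Int :=
  let e := edges.getD j []
  if e.getD 0 0 = (i : Int) + 1 ∨ e.getD 1 0 = (i : Int) + 1 then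
    (if e.length = 3 then e.getD 2 0 else 1)
  else 0

theorem pv_foldl_push {α β : Type} (f : α → β) :
    ∀ (l : List α) (acc : List β),
      l.foldl (fun r x => r ++ [f x]) acc = acc ++ l.map f := by
  intro l
  induction l with
  | nil => intro acc; simp
  | cons x xs ih => intro acc; simp [List.foldl, ih]

theorem pvA_closed (edges : List (List Int)) (nrVertices : Int) :
    matricaIncidencijeNeusmjerena edges nrVertices =
      (List.range nrVertices.toNat).map (fun i =>
        (List.range edges.length).map (pvCellVal edges i)) := by
  unfold matricaIncidencijeNeusmjerena
  have hin : ∀ i : Nat,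
      (fun (row : List Int) (j : Nat) =>
        let e := edges.getD j []
        if e.getD 0 0 = (i : Int) + 1 ∨ e.getD 1 0 = (i : Int) + 1 then
          if e.length = 3 then row ++ [e.getD 2 0] else row ++ [1]
        else row ++ [0]) =
      (fun row j => row ++ [pvCellVal edges i j]) := by
    intro i; funext row j
    simp only [pvCellVal]
    split_ifs <;> rfl
  have hout : (fun (acc : List (List Int)) (i : Nat) =>
      acc ++ [(List.range edges.length).foldl (fun row j =>
        let e := edges.getD j []
        if e.getD 0 0 = (i : Int) + 1 ∨ e.getD 1 0 = (i : Int) + 1 then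
          if e.length = 3 then row ++ [e.getD 2 0] else row ++ [1]
        else row ++ [0]) []]) =
      (fun acc i => acc ++ [(fun i => (List.range edges.length).map (pvCellVal edges i)) i]) := by
    funext acc i
    rw [hin i, pv_foldl_push]
    simp
  rw [hout, pv_foldl_push]
  simp

theorem pv_set_getD (l : List Int) (j c : Nat) (x : Int) :
    (l.set j x).getD c 0 = if c = j ∧ j < l.length then x else l.getD c 0 := by
  by_cases h : c = j ∧ j < l.length
  · obtain ⟨rfl, h2⟩ := h
    simp [List.getD, h2]
  · rw [if_neg h]
    by_cases hc : c = j
    · subst hc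
      have : l.length ≤ c := by
        rcases Nat.lt_or_ge c l.length with h1 | h1
        · exact absurd ⟨rfl, h1⟩ h
        · exact h1
      simp [List.getD, List.getElem?_eq_none (by simpa using this),
        List.getElem?_eq_none (l := l.set c x) (by simpa using this)]
    · simp [List.getD, List.getElem?_set_ne (Ne.symm hc)]

theorem pv_setrow_getD (m : List (List Int)) (k i : Nat) (r : List Int) :
    (m.set k r).getD i [] = if i = k ∧ k < m.length then r else m.getD i [] := by
  by_cases h : i = k ∧ k < m.length
  · obtain ⟨rfl, h2⟩ := h
    simp [List.getD, h2]
  · rw [if_neg h]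
    by_cases hc : i = k
    · subst hc
      have : m.length ≤ i := by
        rcases Nat.lt_or_ge i m.length with h1 | h1
        · exact absurd ⟨rfl, h1⟩ h
        · exact h1
      simp [List.getD, List.getElem?_eq_none (by simpa using this),
        List.getElem?_eq_none (l := m.set i r) (by simpa using this)]
    · simp [List.getD, List.getElem?_set_ne (Ne.symm hc)]

theorem pvCell_length (V : Int) (j : Nat) (v value : Int) (m : List (List Int)) :
    (pvCell V j v value m).length = m.length := by
  unfold pvCell; split <;> simp

theorem pvCell_rows (V : Int) (j : Nat) (v value : Int) (m : List (List Int)) (E : Nat)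
    (hr : ∀ r ∈ m, r.length = E) : ∀ r ∈ pvCell V j v value m, r.length = E := by
  unfold pvCell
  split
  · by_cases h2 : (v - 1).toNat < m.length
    · intro r hrm
      rcases List.mem_or_eq_of_mem_set hrm with h | rfl
      · exact hr r h
      · rw [List.length_set, List.getD_eq_getElem _ _ h2]
        exact hr _ (List.getElem_mem h2)
    · rw [List.set_eq_of_length_le (Nat.le_of_not_lt h2)]
      exact hr
  · exact hr

theorem pvCell_getD (V : Int) (j : Nat) (v value : Int) (m : List (List Int)) (i c : Nat) (E : Nat)
    (hi : i < m.length) (hV : m.length = V.toNat) (hr : ∀ r ∈ m, r.length = E)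
    (hjE : j < E) :
    ((pvCell V j v value m).getD i []).getD c 0 =
      if v = (i : Int) + 1 ∧ c = j then value else (m.getD i []).getD c 0 := by
  have hiV : (i : Int) + 1 ≤ V ∧ 1 ≤ (i : Int) + 1 := by
    have : i < V.toNat := hV ▸ hi
    omega
  have hleni : (m.getD i []).length = E := by
    rw [List.getD_eq_getElem _ _ hi]; exact hr _ (List.getElem_mem hi)
  unfold pvCell
  by_cases hv : 1 ≤ v ∧ v ≤ V
  · rw [if_pos hv, pv_setrow_getD]
    by_cases hk : i = (v - 1).toNat ∧ (v - 1).toNat < m.length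
    · rw [if_pos hk]
      have hveq : v = (i : Int) + 1 := by omega
      have hrow : m.getD (v - 1).toNat [] = m.getD i [] := by rw [← hk.1]
      rw [hrow, pv_set_getD, hleni]
      by_cases hcj : c = j
      · rw [if_pos ⟨hcj, hjE⟩, if_pos ⟨hveq, hcj⟩]
      · rw [if_neg (fun h => hcj h.1), if_neg (fun h => hcj h.2)]
    · rw [if_neg hk]
      have hne : v ≠ (i : Int) + 1 := by
        intro h; exact hk ⟨by omega, by omega⟩
      rw [if_neg (fun h => hne h.1)]
  · rw [if_neg hv]
    have hne : v ≠ (i : Int) + 1 := by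
      intro h; exact hv ⟨by omega, by omega⟩
    rw [if_neg (fun h => hne h.1)]

theorem pvScatter_length (V : Int) :
    ∀ (rest : List (List Int)) (j : Nat) (m : List (List Int)),
      (pvScatter V j rest m).length = m.length := by
  intro rest
  induction rest with
  | nil => intro j m; rfl
  | cons e t ih =>
    intro j m
    simp only [pvScatter]
    rw [ih, pvCell_length, pvCell_length]

theorem pvScatter_rows (V : Int) (E : Nat) :
    ∀ (rest : List (List Int)) (j : Nat) (m : List (List Int)),
      (∀ r ∈ m, r.length = E) → ∀ r ∈ pvScatter V j rest m, r.length = E := by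
  intro rest
  induction rest with
  | nil => intro j m h; exact h
  | cons e t ih =>
    intro j m h
    exact ih _ _ (pvCell_rows _ _ _ _ _ _ (pvCell_rows _ _ _ _ _ _ h))

theorem pvScatter_getD (V : Int) (E : Nat) :
    ∀ (rest : List (List Int)) (j : Nat) (m : List (List Int)) (i c : Nat),
      i < m.length → m.length = V.toNat → (∀ r ∈ m, r.length = E) →
      j + rest.length ≤ E →
      ((pvScatter V j rest m).getD i []).getD c 0 =
        if j ≤ c ∧ c < j + rest.length ∧
            ((rest.getD (c - j) []).getD 0 0 = (i : Int) + 1 ∨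
             (rest.getD (c - j) []).getD 1 0 = (i : Int) + 1) then
          (if (rest.getD (c - j) []).length = 3 then (rest.getD (c - j) []).getD 2 0 else 1)
        else (m.getD i []).getD c 0 := by
  intro rest
  induction rest with
  | nil =>
    intro j m i c hi hV hr hE
    simp only [pvScatter, List.length_nil]
    rw [if_neg (by omega)]
  | cons e t ih =>
    intro j m i c hi hV hr hE
    have hjE : j < E := by simp at hE; omega
    simp only [pvScatter]
    have hl1 : (pvCell V j (e.getD 0 0) (if e.length = 3 then e.getD 2 0 else 1) m).length = m.length :=
      pvCell_length _ _ _ _ _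
    have hr1 : ∀ r ∈ pvCell V j (e.getD 0 0) (if e.length = 3 then e.getD 2 0 else 1) m, r.length = E :=
      pvCell_rows _ _ _ _ _ _ hr
    have hl2 : (pvCell V j (e.getD 1 0) (if e.length = 3 then e.getD 2 0 else 1)
        (pvCell V j (e.getD 0 0) (if e.length = 3 then e.getD 2 0 else 1) m)).length = m.length := by
      rw [pvCell_length, hl1]
    have hr2 : ∀ r ∈ pvCell V j (e.getD 1 0) (if e.length = 3 then e.getD 2 0 else 1)
        (pvCell V j (e.getD 0 0) (if e.length = 3 then e.getD 2 0 else 1) m), r.length = E :=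
      pvCell_rows _ _ _ _ _ _ hr1
    rw [ih (j + 1) _ i c (hl2 ▸ hi) (hl2 ▸ hV) hr2 (by simp at hE ⊢; omega)]
    have hstep : ∀ c' : Nat,
        ((pvCell V j (e.getD 1 0) (if e.length = 3 then e.getD 2 0 else 1)
            (pvCell V j (e.getD 0 0) (if e.length = 3 then e.getD 2 0 else 1) m)).getD i []).getD c' 0 =
          if (e.getD 0 0 = (i : Int) + 1 ∨ e.getD 1 0 = (i : Int) + 1) ∧ c' = j then
            (if e.length = 3 then e.getD 2 0 else 1)
          else (m.getD i []).getD c' 0 := by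
      intro c'
      rw [pvCell_getD _ _ _ _ _ _ _ E (hl1 ▸ hi) (hl1 ▸ hV) hr1 hjE,
          pvCell_getD _ _ _ _ _ _ _ E hi hV hr hjE]
      by_cases hcj : c' = j
      · subst hcj
        split_ifs <;> first | rfl | tauto
      · rw [if_neg (fun h => hcj h.2), if_neg (fun h => hcj h.2), if_neg (fun h => hcj h.2)]
    rcases Nat.lt_trichotomy c j with hc | hc | hc
    · have h1 : ¬(j + 1 ≤ c ∧ c < j + 1 + t.length ∧
          ((t.getD (c - (j + 1)) []).getD 0 0 = (i : Int) + 1 ∨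
           (t.getD (c - (j + 1)) []).getD 1 0 = (i : Int) + 1)) := by omega
      have h2 : ¬(j ≤ c ∧ c < j + (e :: t).length ∧
          (((e :: t).getD (c - j) []).getD 0 0 = (i : Int) + 1 ∨
           ((e :: t).getD (c - j) []).getD 1 0 = (i : Int) + 1)) := by
        intro h; omega
      rw [if_neg h1, if_neg h2, hstep c, if_neg (fun h => absurd h.2 (by omega))]
    · subst hc
      have h1 : ¬(c + 1 ≤ c ∧ c < c + 1 + t.length ∧
          ((t.getD (c - (c + 1)) []).getD 0 0 = (i : Int) + 1 ∨
           (t.getD (c - (c + 1)) []).getD 1 0 = (i : Int) + 1)) := by omega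
      rw [if_neg h1, hstep c]
      simp only [Nat.sub_self, List.getD_cons_zero, List.length_cons]
      by_cases hm : e.getD 0 0 = (i : Int) + 1 ∨ e.getD 1 0 = (i : Int) + 1
      · have hc1 : (e.getD 0 0 = (i : Int) + 1 ∨ e.getD 1 0 = (i : Int) + 1) ∧ True := ⟨hm, trivial⟩
        have hc2 : c ≤ c ∧ c < c + (t.length + 1) ∧
            (e.getD 0 0 = (i : Int) + 1 ∨ e.getD 1 0 = (i : Int) + 1) := ⟨Nat.le_refl c, by omega, hm⟩
        rw [if_pos hc1, if_pos hc2]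
      · have hc1 : ¬((e.getD 0 0 = (i : Int) + 1 ∨ e.getD 1 0 = (i : Int) + 1) ∧ True) :=
          fun h => hm h.1
        have hc2 : ¬(c ≤ c ∧ c < c + (t.length + 1) ∧
            (e.getD 0 0 = (i : Int) + 1 ∨ e.getD 1 0 = (i : Int) + 1)) := fun h => hm h.2.2
        rw [if_neg hc1, if_neg hc2]
    · have hsub : c - j = (c - (j + 1)) + 1 := by omega
      rw [hsub, List.getD_cons_succ, List.length_cons]
      by_cases hcond : j + 1 ≤ c ∧ c < j + 1 + t.length ∧
          ((t.getD (c - (j + 1)) []).getD 0 0 = (i : Int) + 1 ∨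
           (t.getD (c - (j + 1)) []).getD 1 0 = (i : Int) + 1)
      · have hc2 : j ≤ c ∧ c < j + (t.length + 1) ∧
            ((t.getD (c - (j + 1)) []).getD 0 0 = (i : Int) + 1 ∨
             (t.getD (c - (j + 1)) []).getD 1 0 = (i : Int) + 1) := ⟨by omega, by omega, hcond.2.2⟩
        rw [if_pos hcond, if_pos hc2]
      · have hc2 : ¬(j ≤ c ∧ c < j + (t.length + 1) ∧
            ((t.getD (c - (j + 1)) []).getD 0 0 = (i : Int) + 1 ∨
             (t.getD (c - (j + 1)) []).getD 1 0 = (i : Int) + 1)) :=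
          fun h => hcond ⟨by omega, by omega, h.2.2⟩
        have hc3 : ¬((e.getD 0 0 = (i : Int) + 1 ∨ e.getD 1 0 = (i : Int) + 1) ∧ c = j) :=
          fun h => by omega
        rw [if_neg hcond, hstep c, if_neg hc3, if_neg hc2]

theorem pv_eq_of_getD (l1 l2 : List Int) (h : l1.length = l2.length)
    (h2 : ∀ c, l1.getD c 0 = l2.getD c 0) : l1 = l2 := by
  apply List.ext_getElem h
  intro i h1' h2'
  have := h2 i
  rwa [List.getD_eq_getElem _ _ h1', List.getD_eq_getElem _ _ h2'] at this

theorem pv_eq_of_getD_rows (l1 l2 : List (List Int)) (h : l1.length = l2.length)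
    (h2 : ∀ i, l1.getD i [] = l2.getD i []) : l1 = l2 := by
  apply List.ext_getElem h
  intro i h1' h2'
  have := h2 i
  rwa [List.getD_eq_getElem _ _ h1', List.getD_eq_getElem _ _ h2'] at this

-- ===== VERDICT (by name: the statement is the Claim_ definition above) =====
theorem matricaIncidencijeNeusmjerena_spec : Claim_equal_matricaIncidencijeNeusmjerena := by
  unfold Claim_equal_matricaIncidencijeNeusmjerena Spec_matricaIncidencijeNeusmjerena
  intro edges nrVertices _ _
  rw [pvA_closed]
  unfold matricaIncidencijeNeusmjerena_alt
  have hrepl : ∀ r ∈ List.replicate nrVertices.toNat (List.replicate edges.length (0 : Int)),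
      r.length = edges.length := by
    intro r hr
    rw [List.eq_of_mem_replicate hr]
    simp
  have hlen : (pvScatter nrVertices 0 edges
      (List.replicate nrVertices.toNat (List.replicate edges.length 0))).length =
      nrVertices.toNat := by
    rw [pvScatter_length]; simp
  symm
  apply pv_eq_of_getD_rows
  · simp [hlen]
  · intro i
    by_cases hi : i < nrVertices.toNat
    · have hlhs : ((List.range nrVertices.toNat).map (fun i =>
          (List.range edges.length).map (pvCellVal edges i))).getD i [] =
          (List.range edges.length).map (pvCellVal edges i) := by
        rw [List.getD_eq_getElem _ _ (by simpa using hi)]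
        simp
      have hmem : (pvScatter nrVertices 0 edges
          (List.replicate nrVertices.toNat (List.replicate edges.length 0))).getD i [] ∈
          pvScatter nrVertices 0 edges
            (List.replicate nrVertices.toNat (List.replicate edges.length 0)) := by
        rw [List.getD_eq_getElem _ _ (by omega)]
        exact List.getElem_mem _
      have hrowlen := pvScatter_rows nrVertices edges.length edges 0 _ hrepl _ hmem
      apply pv_eq_of_getD
      · rw [hlhs, hrowlen]
        simp
      · intro c
        rw [hlhs]
        rw [pvScatter_getD nrVertices edges.length edges 0 _ i c (by simpa using hi)
          (by simp) hrepl (by simp)]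
        have hreplrow : (List.replicate nrVertices.toNat
            (List.replicate edges.length (0 : Int))).getD i [] =
            List.replicate edges.length (0 : Int) := by
          rw [List.getD_eq_getElem _ _ (by simpa using hi)]
          simp
        rw [hreplrow]
        by_cases hc : c < edges.length
        · have hmaps : ((List.range edges.length).map (pvCellVal edges i)).getD c 0 =
              pvCellVal edges i c := by
            rw [List.getD_eq_getElem _ _ (by simpa using hc)]
            simp
          rw [hmaps]
          unfold pvCellVal
          simp only [Nat.sub_zero, Nat.zero_add]
          by_cases hm : (edges.getD c []).getD 0 0 = (i : Int) + 1 ∨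
              (edges.getD c []).getD 1 0 = (i : Int) + 1
          · rw [if_pos ⟨Nat.zero_le c, hc, hm⟩, if_pos hm]
          · rw [if_neg (fun h => hm h.2.2), if_neg hm]
            simp [List.getD]
        · have h1 : ¬(0 ≤ c ∧ c < 0 + edges.length ∧
              ((edges.getD (c - 0) []).getD 0 0 = (i : Int) + 1 ∨
               (edges.getD (c - 0) []).getD 1 0 = (i : Int) + 1)) := by
            intro h; omega
          rw [if_neg h1,
            List.getD_eq_default _ _ (by simp; omega),
            List.getD_eq_default _ _ (by simp; omega)]
    · have h1 : ((List.range nrVertices.toNat).map (fun i =>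
          (List.range edges.length).map (pvCellVal edges i))).getD i [] = [] := by
        apply List.getD_eq_default
        simpa using Nat.le_of_not_lt hi
      have h2 : (pvScatter nrVertices 0 edges
          (List.replicate nrVertices.toNat (List.replicate edges.length 0))).getD i [] = [] := by
        apply List.getD_eq_default
        omega
      rw [h1, h2]
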